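-- pv_equiv track=rewrite | github.com/myurry/algorithms | Dynamic/max_square.py | build_roof
-- ===== SOURCE A (Python) =====
-- planks = [11, 12, 11, 9, 13, 77, 9, 1, 79, 12, 11, 5, 28] # Example
--
-- def build_roof(planks):
--     '''Takes the input, assigns every plank size its amount, then finds max_size, linear time'''
--     planks.sort(reverse=True)
--     sizes = list(set(planks))
--     sizes.sort(reverse=True)
--     amount = {}
--     max_size = 0
--
--     for i in sizes:
--         amount[i] = planks.count(i)
--         width = sum([amount[j] for j in sizes if j >= i])
--         if i < width:
--             if max_size < i:
--                 max_size = i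
--         else:
--             if max_size < width:
--                 max_size = width
--     return max_size
-- ===== SOURCE B (Python) =====
-- def build_roof(planks):
--     '''h-index style: one descending sort; the k-th largest plank (1-based)
--     supports a square of side min(plank, k); take the best over k.'''
--     planks.sort(reverse=True)
--     best = 0
--     for k, v in enumerate(planks, 1):
--         best = max(best, min(v, k))
--     return best
-- ===== Notes on version B (the rewrite author's own statement) =====
-- stated objective: faster
-- what changed: Replaced the per-distinct-size pass that re-counts and re-sums a comprehension over all sizes (quadratic) by a single h-index-style scan over the descending-sorted list taking max of min(plank, position).
import Mathlib
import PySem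

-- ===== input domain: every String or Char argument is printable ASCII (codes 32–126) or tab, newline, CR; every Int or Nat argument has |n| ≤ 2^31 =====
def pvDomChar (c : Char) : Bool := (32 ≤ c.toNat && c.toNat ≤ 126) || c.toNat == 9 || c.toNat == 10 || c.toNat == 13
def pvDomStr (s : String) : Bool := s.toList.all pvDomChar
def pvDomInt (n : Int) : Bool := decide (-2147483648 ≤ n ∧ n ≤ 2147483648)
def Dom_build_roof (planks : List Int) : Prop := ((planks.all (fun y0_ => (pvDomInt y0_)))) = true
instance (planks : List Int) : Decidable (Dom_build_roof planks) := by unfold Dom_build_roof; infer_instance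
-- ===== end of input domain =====

-- B replaces A's quadratic per-distinct-size re-count/re-sum by a single max-of-min scan over the
-- descending-sorted list (objective: faster). Both A and B sort `planks` in place (the same mutation);
-- the equivalence proved here is about the return value.

-- ===== PORT A =====
def build_roof (planks : List Int) : Int :=
  let planks := PySem.List.sorted planks (fun x => x) true
  let sizes := PySem.List.sorted (PySem.Set.ofList planks) (fun x => x) true
  let st := sizes.foldl (fun (st : PySem.Dict Int Int × Int) i =>
      let amount := st.1.insert i (PySem.List.count planks i : Int)
      -- amount[j]: a KeyError is unreachable (sizes is descending, so every j ≥ i is already a key); getD is exact here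
      let width := ((sizes.filter (fun j => decide (i ≤ j))).map (fun j => amount.getD j 0)).sum
      (amount,
        if i < width then (if st.2 < i then i else st.2)
        else (if st.2 < width then width else st.2)))
    (PySem.Dict.empty, 0)
  st.2

-- ===== PORT B =====
def build_roof_alt (planks : List Int) : Int :=
  let planks := PySem.List.sorted planks (fun x => x) true
  (PySem.List.enumerate planks 1).foldl (fun best p => max best (min p.2 p.1)) 0

-- ===== PRECONDITION & SPEC =====
def Spec_build_roof (planks : List Int) (out : Int) : Prop := out = build_roof_alt planks
instance (planks : List Int) (out : Int) : Decidable (Spec_build_roof planks out) := by unfold Spec_build_roof; infer_instance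

-- ===== CLAIM (what is proved, stated in full; the proofs are below) =====
def Claim_equal_build_roof : Prop := ∀ (planks : List Int), Dom_build_roof planks → Spec_build_roof planks (build_roof planks)

-- ===== LEMMAS AND PROOFS =====

-- number of planks (in s) of size ≥ i, as an Int
def cge (s : List Int) (i : Int) : Int := (s.countP (fun x => decide (i ≤ x)) : Int)


lemma sum_ite_not_mem (L : List Int) (a : Int) (h : a ∉ L) :
    (L.map (fun j => if a = j then (1:Int) else 0)).sum = 0 := by
  induction L with
  | nil => simp
  | cons b t ih =>
    simp only [List.mem_cons, not_or] at h
    simp [h.1, ih h.2]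

lemma sum_ite_nodup (L : List Int) (hnd : L.Nodup) (a : Int) :
    (L.map (fun j => if a = j then (1:Int) else 0)).sum = if a ∈ L then 1 else 0 := by
  induction L with
  | nil => simp
  | cons b t ih =>
    rw [List.nodup_cons] at hnd
    by_cases hab : a = b
    · subst hab
      simp [sum_ite_not_mem t a hnd.1]
    · simp [hab, ih hnd.2]

lemma sum_counts_filter (s sizes : List Int) (i : Int)
    (hnd : sizes.Nodup) (hsub : ∀ x ∈ s, x ∈ sizes) :
    ((sizes.filter (fun j => decide (i ≤ j))).map (fun j => (s.count j : Int))).sum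
      = cge s i := by
  induction s with
  | nil => simp [cge]
  | cons a t ih =>
    have hsub' : ∀ x ∈ t, x ∈ sizes := fun x hx => hsub x (List.mem_cons_of_mem a hx)
    have hmemF : a ∈ sizes.filter (fun j => decide (i ≤ j)) ↔ (i ≤ a) := by
      simp [List.mem_filter, hsub a List.mem_cons_self]
    have hcount : ∀ j : Int, ((a :: t).count j : Int)
        = (t.count j : Int) + (if j = a then 1 else 0) := by
      intro j
      rw [List.count_cons]
      by_cases h : j = a
      · simp [h]
      · simp [h]
        omega
    calc ((sizes.filter (fun j => decide (i ≤ j))).map (fun j => ((a :: t).count j : Int))).sum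
        = ((sizes.filter (fun j => decide (i ≤ j))).map
            (fun j => (t.count j : Int) + (if j = a then 1 else 0))).sum := by
          exact congrArg List.sum (List.map_congr_left (fun j _ => hcount j))
      _ = ((sizes.filter (fun j => decide (i ≤ j))).map (fun j => (t.count j : Int))).sum
            + ((sizes.filter (fun j => decide (i ≤ j))).map (fun j => if a = j then (1:Int) else 0)).sum := by
          rw [← List.sum_map_add]
          exact congrArg List.sum (List.map_congr_left (fun j _ => by
            by_cases h : j = a
            · simp [h]
            · simp [h, Ne.symm h]))
      _ = cge t i + (if a ∈ sizes.filter (fun j => decide (i ≤ j)) then 1 else 0) := by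
          rw [ih hsub', sum_ite_nodup _ (hnd.filter _) a]
      _ = cge (a :: t) i := by
          simp only [cge, List.countP_cons, hmemF, decide_eq_true_eq]
          split_ifs with h <;> push_cast <;> omega


lemma foldl_max_eq_of_dominates (L1 L2 : List Int) (init : Int)
    (h1 : ∀ a ∈ L1, ∃ b ∈ L2, a ≤ b) (h2 : ∀ b ∈ L2, ∃ a ∈ L1, b ≤ a) :
    L1.foldl max init = L2.foldl max init := by
  have key : ∀ (X Y : List Int), (∀ a ∈ X, ∃ b ∈ Y, a ≤ b) →
      X.foldl max init ≤ Y.foldl max init := by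
    intro X Y h
    rcases PySem.List.foldl_max_mem X init with hm | hm
    · rw [hm]; exact (PySem.List.le_foldl_max Y init).1
    · rcases h _ hm with ⟨b, hb, hab⟩
      exact le_trans hab ((PySem.List.le_foldl_max Y init).2 b hb)
  exact le_antisymm (key L1 L2 h1) (key L2 L1 h2)

lemma desc_get_ge (s : List Int) (hs : s.Pairwise (· ≥ ·)) (i : Int) (k : Nat)
    (hk : k < s.countP (fun x => decide (i ≤ x))) :
    ∃ hlen : k < s.length, i ≤ s[k] := by
  induction s generalizing k with
  | nil => simp at hk
  | cons a t ih =>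
    rw [List.pairwise_cons] at hs
    obtain ⟨ha, ht⟩ := hs
    by_cases hia : i ≤ a
    · cases k with
      | zero => exact ⟨by simp, by simpa using hia⟩
      | succ k =>
        rw [List.countP_cons] at hk
        simp [hia] at hk
        obtain ⟨hlen, hget⟩ := ih ht k (by omega)
        exact ⟨by simpa using Nat.succ_lt_succ hlen, by simpa using hget⟩
    · exfalso
      have h0 : t.countP (fun x => decide (i ≤ x)) = 0 := by
        rw [List.countP_eq_zero]
        intro x hx
        simp only [decide_eq_true_eq]
        have := ha x hx; omega
      rw [List.countP_cons] at hk
      simp [hia, h0] at hk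

lemma desc_countP_ge (s : List Int) (hs : s.Pairwise (· ≥ ·)) (k : Nat) (hlen : k < s.length) :
    k + 1 ≤ s.countP (fun x => decide (s[k] ≤ x)) := by
  induction s generalizing k with
  | nil => simp at hlen
  | cons a t ih =>
    rw [List.pairwise_cons] at hs
    obtain ⟨ha, ht⟩ := hs
    cases k with
    | zero => rw [List.countP_cons]; simp
    | succ k =>
      have hlen' : k < t.length := by simpa using hlen
      have hget : (a :: t)[k + 1] = t[k] := by simp
      rw [hget, List.countP_cons]
      have hmem : t[k] ∈ t := List.getElem_mem hlen'
      have : t[k] ≤ a := ha _ hmem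
      simp only [this, decide_true, if_pos trivial]
      have := ih ht k hlen'
      omega


lemma foldA (s : List Int) (sizes : List Int) (hdesc : sizes.Pairwise (· > ·)) :
    ∀ (rest pre : List Int), sizes = pre ++ rest →
    ∀ (d : PySem.Dict Int Int) (m : Int),
    (∀ j : Int, d.getD j 0 = if j ∈ pre then (s.count j : Int) else 0) →
    (rest.foldl (fun (st : PySem.Dict Int Int × Int) i =>
      (st.1.insert i (PySem.List.count s i : Int),
        if i < ((sizes.filter (fun j => decide (i ≤ j))).map
              (fun j => (st.1.insert i (PySem.List.count s i : Int)).getD j 0)).sum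
        then (if st.2 < i then i else st.2)
        else (if st.2 < ((sizes.filter (fun j => decide (i ≤ j))).map
              (fun j => (st.1.insert i (PySem.List.count s i : Int)).getD j 0)).sum
          then ((sizes.filter (fun j => decide (i ≤ j))).map
              (fun j => (st.1.insert i (PySem.List.count s i : Int)).getD j 0)).sum
          else st.2))) (d, m)).2
    = rest.foldl (fun m i =>
        max m (min i (((sizes.filter (fun j => decide (i ≤ j))).map (fun j => (s.count j : Int))).sum))) m := by
  intro rest
  induction rest with
  | nil => intro pre hsizes d m hd; rfl
  | cons i rest' ih =>
    intro pre hsizes d m hd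
    have hnd : sizes.Nodup := hdesc.imp (fun h => ne_of_gt h)
    have hipre : i ∉ pre := by
      have := hnd
      rw [hsizes, List.nodup_append] at this
      exact fun hmem => this.2.2 i hmem i List.mem_cons_self rfl
    have hrest_lt : ∀ j ∈ rest', j < i := by
      have hp : (i :: rest').Pairwise (· > ·) := ((List.pairwise_append.mp (hsizes ▸ hdesc)).2.1)
      exact fun j hj => (List.pairwise_cons.mp hp).1 j hj
    have hwidth : ((sizes.filter (fun j => decide (i ≤ j))).map
          (fun j => (d.insert i (PySem.List.count s i : Int)).getD j 0)).sum
        = ((sizes.filter (fun j => decide (i ≤ j))).map (fun j => (s.count j : Int))).sum := by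
      refine congrArg List.sum (List.map_congr_left ?_)
      intro j hj
      rw [List.mem_filter] at hj
      obtain ⟨hjs, hij⟩ := hj
      rw [decide_eq_true_eq] at hij
      by_cases hji : j = i
      · subst hji
        rw [PySem.Dict.getD_insert_self, PySem.List.count_eq]
      · rw [PySem.Dict.getD_insert_of_ne _ _ _ hji, hd j, if_pos]
        rw [hsizes, List.mem_append] at hjs
        rcases hjs with h | h
        · exact h
        · rcases List.mem_cons.mp h with h' | h'
          · exact absurd h' hji
          · exact absurd (hrest_lt j h') (by omega)
    rw [List.foldl_cons, List.foldl_cons]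
    have hstep : ∀ (W : Int),
        (if i < W then (if m < i then i else m) else (if m < W then W else m)) = max m (min i W) := by
      intro W; split_ifs <;> omega
    simp only [hwidth, hstep]
    exact ih (pre ++ [i]) (by rw [hsizes, List.append_assoc]; rfl) _ _ (by
      intro j
      by_cases hji : j = i
      · subst hji
        rw [PySem.Dict.getD_insert_self, PySem.List.count_eq, if_pos (by simp)]
      · rw [PySem.Dict.getD_insert_of_ne _ _ _ hji, hd j]
        simp [hji])

-- A's value equals B's value on every input
lemma build_roof_eq_alt (planks : List Int) : build_roof planks = build_roof_alt planks := by
  simp only [build_roof, build_roof_alt]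
  generalize hs : PySem.List.sorted planks (fun x => x) true = s
  have hsdesc : s.Pairwise (· ≥ ·) := by
    rw [← hs]; exact (PySem.List.sorted_pairwise_rev planks (fun x => x)).imp (fun h => h)
  generalize hsz : PySem.List.sorted (PySem.Set.ofList s) (fun x => x) true = sizes
  have hperm : sizes.Perm (PySem.Set.ofList s) := by rw [← hsz]; exact PySem.List.sorted_perm _ _ _
  have hnd : sizes.Nodup := hperm.nodup_iff.mpr (PySem.Set.nodup_ofList s)
  have hle : sizes.Pairwise (fun a b => b ≤ a) := by
    rw [← hsz]; exact PySem.List.sorted_pairwise_rev _ _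
  have hszdesc : sizes.Pairwise (· > ·) :=
    (hle.and hnd).imp (fun h => lt_of_le_of_ne h.1 (Ne.symm h.2))
  have hmem : ∀ x : Int, x ∈ sizes ↔ x ∈ s := by
    intro x
    rw [← hsz, PySem.List.mem_sorted, PySem.Set.mem_ofList]
  have hsub : ∀ x ∈ s, x ∈ sizes := fun x hx => (hmem x).mpr hx
  have hA := foldA s sizes hszdesc sizes [] rfl PySem.Dict.empty 0
    (by intro j; simp [PySem.Dict.getD_empty])
  rw [hA]
  have hfun : (fun (m i : Int) =>
      max m (min i (((sizes.filter (fun j => decide (i ≤ j))).map (fun j => (s.count j : Int))).sum)))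
      = fun (m i : Int) => max m (min i (cge s i)) := by
    funext m i
    rw [sum_counts_filter s sizes i hnd hsub]
  rw [hfun]
  rw [show (sizes.foldl (fun (m i : Int) => max m (min i (cge s i))) 0)
      = (sizes.map (fun i => min i (cge s i))).foldl max 0 from (List.foldl_map).symm]
  rw [show ((PySem.List.enumerate s 1).foldl (fun best p => max best (min p.2 p.1)) 0)
      = ((PySem.List.enumerate s 1).map (fun p => min p.2 p.1)).foldl max 0 from (List.foldl_map).symm]
  apply foldl_max_eq_of_dominates
  · intro a ha
    rcases List.mem_map.mp ha with ⟨i, hi, rfl⟩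
    have his : i ∈ s := (hmem i).mp hi
    have hc : 0 < s.countP (fun x => decide (i ≤ x)) := by
      rw [List.countP_pos_iff]
      exact ⟨i, his, by simp⟩
    obtain ⟨hlen, hge⟩ := desc_get_ge s hsdesc i (s.countP (fun x => decide (i ≤ x)) - 1) (by omega)
    refine ⟨min (s[s.countP (fun x => decide (i ≤ x)) - 1]'hlen)
        ((1 : Int) + ((s.countP (fun x => decide (i ≤ x)) - 1 : Nat) : Int)), ?_, ?_⟩
    · exact List.mem_map.mpr ⟨(1 + ((s.countP (fun x => decide (i ≤ x)) - 1 : Nat) : Int),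
        s[s.countP (fun x => decide (i ≤ x)) - 1]'hlen),
        (PySem.List.mem_enumerate_iff s 1 _).mpr ⟨_, hlen, rfl⟩, rfl⟩
    · simp only [cge]
      omega
  · intro b hb
    rcases List.mem_map.mp hb with ⟨p, hp, rfl⟩
    rcases (PySem.List.mem_enumerate_iff s 1 p).mp hp with ⟨k, hk, rfl⟩
    have hvs : s[k] ∈ s := List.getElem_mem hk
    have hcnt := desc_countP_ge s hsdesc k hk
    refine ⟨min s[k] (cge s s[k]), List.mem_map.mpr ⟨s[k], hsub _ hvs, rfl⟩, ?_⟩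
    simp only [cge]
    omega

-- ===== VERDICT (by name: the statement is the Claim_ definition above) =====
theorem build_roof_spec : Claim_equal_build_roof := by
  intro planks _
  exact build_roof_eq_alt planks
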